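-- pv_equiv track=rewrite | github.com/fuhdan/certificate-tools | backend-fastapi/services/content_manifest_generator.py | _extract_domain_from_subject
-- ===== SOURCE A (Python) =====
-- def _extract_domain_from_subject(subject: str) -> str:
--     """Extract domain name from certificate subject"""
--     if not subject:
--         return 'N/A'
--
--     # Try to find CN= in subject
--     for part in subject.split(','):
--         part = part.strip()
--         if part.startswith('CN='):
--             return part[3:].strip()
--
--     return 'N/A'
-- ===== SOURCE B (Python) =====
-- def _extract_domain_from_subject(subject: str) -> str:
--     """Extract domain name from certificate subject"""
--     if not subject:
--         return 'N/A'
--     return _scan(subject)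
--
--
-- def _scan(s: str) -> str:
--     # single left-to-right scan: a CN field starts at a run of whitespace
--     # after the start of a field; no intermediate list of parts is built
--     t = s.lstrip()
--     if t.startswith('CN='):
--         value, _, _ = t[3:].partition(',')
--         return value.strip()
--     _, sep, rest = s.partition(',')
--     if sep:
--         return _scan(rest)
--     return 'N/A'
-- ===== Notes on version B (the rewrite author's own statement) =====
-- stated objective: alternative
-- what changed: B replaces A's split-into-a-list-of-parts-then-scan with a single recursive left-to-right scan of the string itself, using lstrip/partition to consume one comma-field at a time without ever materializing the list of parts.
import Mathlib
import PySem

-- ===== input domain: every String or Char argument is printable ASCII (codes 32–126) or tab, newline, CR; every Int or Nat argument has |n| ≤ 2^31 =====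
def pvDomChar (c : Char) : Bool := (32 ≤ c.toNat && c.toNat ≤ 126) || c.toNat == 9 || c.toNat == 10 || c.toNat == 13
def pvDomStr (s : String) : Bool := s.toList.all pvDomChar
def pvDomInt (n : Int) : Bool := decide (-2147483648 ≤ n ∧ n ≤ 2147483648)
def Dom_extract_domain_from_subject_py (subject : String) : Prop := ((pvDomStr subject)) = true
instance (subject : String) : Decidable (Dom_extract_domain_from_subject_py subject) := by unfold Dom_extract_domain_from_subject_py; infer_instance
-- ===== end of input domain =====

-- B replaces A's split-into-list-of-parts-then-scan with a single recursive left-to-right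
-- scan consuming one comma-field at a time (lstrip/partition), never building the parts list.


-- ===== PORT A =====
-- 'for part in subject.split(','): part = part.strip(); if part.startswith('CN='): return part[3:].strip()'
def pyA_loop : List (List Char) → String
  | [] => "N/A"
  | p :: rest =>
    let part := PySem.Chars.strip p
    if PySem.Chars.startswith part ['C', 'N', '='] then
      String.mk (PySem.Chars.strip (PySem.List.slice part (some 3) none))
    else pyA_loop rest

def extract_domain_from_subject_py (subject : String) : String :=
  if subject.toList = [] then "N/A"
  else pyA_loop (PySem.Chars.splitOn subject.toList [','])

-- ===== PORT B =====
-- '_scan': t = s.lstrip(); if t.startswith('CN='): return t[3:].partition(',')[0].strip();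
--          _, sep, rest = s.partition(','); return _scan(rest) if sep else 'N/A'
def pyB_scan (s : List Char) : String :=
  let t := PySem.Chars.lstrip s
  if PySem.Chars.startswith t ['C', 'N', '='] then
    String.mk (PySem.Chars.strip
      (List.takeWhile (fun c => c ≠ ',') (PySem.List.slice t (some 3) none)))
  else
    -- '_, sep, rest = s.partition(',')': sep is empty iff no comma remains
    let d := List.dropWhile (fun c => c ≠ ',') s
    if h : d = [] then "N/A"
    else pyB_scan d.tail
termination_by s.length
decreasing_by
  have h1 := List.length_dropWhile_le (fun c : Char => c ≠ ',') s
  have h2 : d.tail.length < d.length := by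
    cases hd : d with
    | nil => exact absurd hd h
    | cons a r => simp [hd]
  exact Nat.lt_of_lt_of_le h2 h1

def extract_domain_from_subject_py_alt (subject : String) : String :=
  if subject.toList = [] then "N/A"
  else pyB_scan subject.toList

-- ===== PRECONDITION & SPEC =====
def Spec_extract_domain_from_subject_py (subject : String) (out : String) : Prop := out = extract_domain_from_subject_py_alt subject
instance (subject : String) (out : String) : Decidable (Spec_extract_domain_from_subject_py subject out) := by unfold Spec_extract_domain_from_subject_py; infer_instance

-- ===== CLAIM (what is proved, stated in full; the proofs are below) =====
def Claim_equal_extract_domain_from_subject_py : Prop := ∀ (subject : String), Dom_extract_domain_from_subject_py subject → Spec_extract_domain_from_subject_py subject (extract_domain_from_subject_py subject)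

-- ===== LEMMAS AND PROOFS =====

-- structural reformulation of splitOn on the single-char separator ','
def mySplit (s : List Char) : List (List Char) :=
  let d := List.dropWhile (fun c => c ≠ ',') s
  if h : d = [] then [List.takeWhile (fun c => c ≠ ',') s]
  else List.takeWhile (fun c => c ≠ ',') s :: mySplit d.tail
termination_by s.length
decreasing_by
  have h1 := List.length_dropWhile_le (fun c : Char => c ≠ ',') s
  have h2 : d.tail.length < d.length := by
    cases hd : d with
    | nil => exact absurd hd h
    | cons a r => simp [hd]
  exact Nat.lt_of_lt_of_le h2 h1

def mapHead (f : List Char → List Char) : List (List Char) → List (List Char)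
  | [] => []
  | x :: xs => f x :: xs

lemma mySplit_comma (rest : List Char) :
    mySplit (',' :: rest) = [] :: mySplit rest := by
  rw [mySplit]
  simp [List.dropWhile, List.takeWhile]

lemma mySplit_cons_ne (c : Char) (rest : List Char) (hc : c ≠ ',') :
    mySplit (c :: rest) = mapHead (c :: ·) (mySplit rest) := by
  have hd : List.dropWhile (fun c : Char => c ≠ ',') (c :: rest)
      = List.dropWhile (fun c : Char => c ≠ ',') rest := by
    simp [List.dropWhile_cons, hc]
  have ht : List.takeWhile (fun c : Char => c ≠ ',') (c :: rest)
      = c :: List.takeWhile (fun c : Char => c ≠ ',') rest := by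
    simp [List.takeWhile_cons, hc]
  rw [mySplit]
  conv_rhs => rw [mySplit]
  rw [hd, ht]
  split_ifs with h
  · simp [mapHead]
  · simp [mapHead]

lemma go_eq (fuel : Nat) : ∀ (l cur : List Char) (acc : List (List Char)),
    l.length ≤ fuel →
    PySem.Chars.splitOn.go [','] fuel l cur acc =
      acc.reverse ++ mapHead (cur.reverse ++ ·) (mySplit l) := by
  induction fuel with
  | zero =>
    intro l cur acc hl
    have : l = [] := List.length_eq_zero_iff.mp (Nat.le_zero.mp hl)
    subst this
    rw [mySplit]
    simp [PySem.Chars.splitOn.go, mapHead, List.dropWhile, List.takeWhile]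
  | succ n ih =>
    intro l cur acc hl
    match l with
    | [] =>
      rw [mySplit]
      simp [PySem.Chars.splitOn.go, mapHead, List.dropWhile, List.takeWhile]
    | c :: rest =>
      by_cases hc : c = ','
      · subst hc
        have hpre : List.isPrefixOf [','] (',' :: rest) = true := by
          simp [List.isPrefixOf]
        rw [PySem.Chars.splitOn.go]
        simp only [hpre, if_pos]
        have hlen : rest.length ≤ n := by simpa using Nat.succ_le_succ_iff.mp hl
        rw [show List.drop (List.length [',']) (',' :: rest) = rest by simp]
        rw [ih rest [] (cur.reverse :: acc) hlen]
        rw [mySplit_comma]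
        rcases hms : mySplit rest with _ | ⟨x, xs⟩ <;> simp [mapHead]
      · have hpre : List.isPrefixOf [','] (c :: rest) = false := by
          simp [List.isPrefixOf, hc]
          exact fun h => absurd h.symm hc
        rw [PySem.Chars.splitOn.go]
        simp only [hpre, Bool.false_eq_true, if_neg, not_false_eq_true]
        have hlen : rest.length ≤ n := by simpa using Nat.succ_le_succ_iff.mp hl
        rw [ih rest (c :: cur) acc hlen]
        rw [mySplit_cons_ne c rest hc]
        rcases hms : mySplit rest with _ | ⟨x, xs⟩ <;> simp [mapHead]
      

lemma splitOn_eq_mySplit (s : List Char) :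
    PySem.Chars.splitOn s [','] = mySplit s := by
  have := go_eq (s.length + 1) s [] [] (Nat.le_succ _)
  simpa [PySem.Chars.splitOn, mapHead] using
    (by
      rcases hms : mySplit s with _ | ⟨x, xs⟩
      · rw [hms] at this; simpa [mapHead] using this
      · rw [hms] at this; simpa [mapHead] using this)

-- ---- whitespace facts ----

lemma rstrip_cons (a : Char) (w : List Char) :
    PySem.Chars.rstrip (a :: w) =
      if PySem.Chars.rstrip w = [] then
        (if PySem.Chars.isspace a then [] else [a])
      else a :: PySem.Chars.rstrip w := by
  unfold PySem.Chars.rstrip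
  rw [show (a :: w).reverse = w.reverse ++ [a] from by simp]
  rw [List.dropWhile_append]
  by_cases h : List.dropWhile PySem.Chars.isspace w.reverse = []
  · simp [h, List.dropWhile]
    by_cases ha : PySem.Chars.isspace a <;> simp [ha]
  · simp [h, List.isEmpty_iff, List.reverse_eq_nil_iff]

lemma rstrip_nil_imp_lstrip_nil (w : List Char) :
    PySem.Chars.rstrip w = [] → PySem.Chars.lstrip w = [] := by
  unfold PySem.Chars.rstrip PySem.Chars.lstrip
  intro h
  rw [List.reverse_eq_nil_iff, List.dropWhile_eq_nil_iff] at h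
  rw [List.dropWhile_eq_nil_iff]
  exact fun c hc => h c (by simpa using hc)

lemma rstrip_rstrip (w : List Char) :
    PySem.Chars.rstrip (PySem.Chars.rstrip w) = PySem.Chars.rstrip w := by
  unfold PySem.Chars.rstrip
  rw [List.reverse_reverse]
  congr 1
  induction w.reverse with
  | nil => rfl
  | cons a t ih =>
    by_cases ha : PySem.Chars.isspace a
    · simp [List.dropWhile, ha, ih]
    · simp [List.dropWhile, ha]

lemma strip_def (x : List Char) :
    PySem.Chars.strip x = PySem.Chars.rstrip (PySem.Chars.lstrip x) := rfl

lemma rstrip_nil : PySem.Chars.rstrip [] = [] := rfl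

lemma lstrip_nil : PySem.Chars.lstrip [] = [] := rfl

lemma lstrip_cons (a : Char) (w : List Char) :
    PySem.Chars.lstrip (a :: w) =
      if PySem.Chars.isspace a then PySem.Chars.lstrip w else a :: w := by
  by_cases ha : PySem.Chars.isspace a <;>
    simp [PySem.Chars.lstrip, List.dropWhile_cons, ha]

lemma strip_rstrip (v : List Char) :
    PySem.Chars.strip (PySem.Chars.rstrip v) = PySem.Chars.strip v := by
  induction v with
  | nil => rfl
  | cons a w ih =>
    by_cases hw : PySem.Chars.rstrip w = []
    · have hl := rstrip_nil_imp_lstrip_nil w hw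
      by_cases ha : PySem.Chars.isspace a <;>
        simp [strip_def, rstrip_cons, lstrip_cons, rstrip_nil, lstrip_nil, hw, ha, hl]
    · by_cases ha : PySem.Chars.isspace a
      · simp [strip_def, rstrip_cons, lstrip_cons, hw, ha]
        simpa [strip_def] using ih
      · simp [strip_def, rstrip_cons, lstrip_cons, rstrip_rstrip, hw, ha]

lemma rstrip_prefix (y : List Char) : PySem.Chars.rstrip y <+: y := by
  unfold PySem.Chars.rstrip
  have h := List.dropWhile_suffix (l := y.reverse) PySem.Chars.isspace
  simpa using List.reverse_prefix.mpr h

-- rstrip of a list starting with "CN=" keeps that prefix intact ('=' is not whitespace)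
lemma rstrip_cn (v : List Char) :
    PySem.Chars.rstrip ('C' :: 'N' :: '=' :: v) = 'C' :: 'N' :: '=' :: PySem.Chars.rstrip v := by
  unfold PySem.Chars.rstrip
  rw [show ('C' :: 'N' :: '=' :: v).reverse = v.reverse ++ ['=', 'N', 'C'] from by simp]
  rw [List.dropWhile_append]
  by_cases h : List.dropWhile PySem.Chars.isspace v.reverse = []
  · simp [h, List.dropWhile, PySem.Chars.isspace]
  · simp [h, List.isEmpty_iff]

lemma startswith_rstrip_cn (y : List Char) :
    PySem.Chars.startswith (PySem.Chars.rstrip y) ['C', 'N', '='] =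
      PySem.Chars.startswith y ['C', 'N', '='] := by
  by_cases h : PySem.Chars.startswith y ['C', 'N', '='] = true
  · rw [h]
    rw [PySem.Chars.startswith_iff] at h
    obtain ⟨v, hv⟩ := h
    subst hv
    rw [show ('C' :: 'N' :: '=' :: ([] : List Char)) ++ v = 'C' :: 'N' :: '=' :: v from rfl]
    rw [rstrip_cn]
    rw [PySem.Chars.startswith_iff]
    exact ⟨_, rfl⟩
  · rw [Bool.not_eq_true] at h
    rw [h, Bool.eq_false_iff]
    intro hc
    rw [PySem.Chars.startswith_iff] at hc
    have := hc.trans (rstrip_prefix y)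
    rw [← PySem.Chars.startswith_iff] at this
    rw [this] at h
    exact Bool.true_eq_false.mp h

-- lstrip commutes with takeWhile (· ≠ ',') since whitespace is never a comma
lemma lstrip_takeWhile (s : List Char) :
    PySem.Chars.lstrip (List.takeWhile (fun c => c ≠ ',') s) =
      List.takeWhile (fun c => c ≠ ',') (PySem.Chars.lstrip s) := by
  induction s with
  | nil => rfl
  | cons a w ih =>
    simp only [ne_eq, decide_not] at ih
    by_cases ha : PySem.Chars.isspace a
    · have hane : a ≠ ',' := by
        intro h; subst h; exact absurd ha (by decide)
      unfold PySem.Chars.lstrip at ih ⊢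
      simp [List.takeWhile, List.dropWhile, hane, ha, ih]
    · unfold PySem.Chars.lstrip
      by_cases hane : a = ','
      · subst hane; simp [List.takeWhile, List.dropWhile, ha]
      · simp [List.takeWhile, List.dropWhile, hane, ha]

lemma startswith_takeWhile_cn (y : List Char) :
    PySem.Chars.startswith (List.takeWhile (fun c => c ≠ ',') y) ['C', 'N', '='] =
      PySem.Chars.startswith y ['C', 'N', '='] := by
  by_cases h : PySem.Chars.startswith y ['C', 'N', '='] = true
  · rw [h]
    rw [PySem.Chars.startswith_iff] at h
    obtain ⟨v, hv⟩ := h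
    subst hv
    rw [PySem.Chars.startswith_iff]
    refine ⟨List.takeWhile (fun c => c ≠ ',') v, ?_⟩
    simp [List.takeWhile]
  · rw [Bool.not_eq_true] at h
    rw [h, Bool.eq_false_iff]
    intro hc
    rw [PySem.Chars.startswith_iff] at hc
    have := hc.trans (List.takeWhile_prefix _)
    rw [← PySem.Chars.startswith_iff] at this
    rw [this] at h
    exact Bool.true_eq_false.mp h

-- the two branch conditions agree
lemma cond_eq (s : List Char) :
    PySem.Chars.startswith (PySem.Chars.strip (List.takeWhile (fun c => c ≠ ',') s)) ['C', 'N', '='] =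
      PySem.Chars.startswith (PySem.Chars.lstrip s) ['C', 'N', '='] := by
  unfold PySem.Chars.strip
  rw [startswith_rstrip_cn, lstrip_takeWhile, startswith_takeWhile_cn]

-- the two returned values agree when the condition holds
lemma val_eq (s : List Char)
    (h : PySem.Chars.startswith (PySem.Chars.lstrip s) ['C', 'N', '='] = true) :
    PySem.Chars.strip (PySem.List.slice (PySem.Chars.strip (List.takeWhile (fun c => c ≠ ',') s)) (some 3) none) =
      PySem.Chars.strip (List.takeWhile (fun c => c ≠ ',')
        (PySem.List.slice (PySem.Chars.lstrip s) (some 3) none)) := by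
  rw [PySem.List.slice_from _ (by norm_num : (0:ℤ) ≤ 3),
      PySem.List.slice_from _ (by norm_num : (0:ℤ) ≤ 3)]
  rw [PySem.Chars.startswith_iff] at h
  obtain ⟨v, hv⟩ := h
  have hu : PySem.Chars.lstrip s = 'C' :: 'N' :: '=' :: v := by rw [← hv]; rfl
  rw [show PySem.Chars.strip (List.takeWhile (fun c => c ≠ ',') s) =
      PySem.Chars.rstrip (List.takeWhile (fun c => c ≠ ',') (PySem.Chars.lstrip s)) from by
    unfold PySem.Chars.strip; rw [lstrip_takeWhile]]
  rw [hu]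
  rw [show List.takeWhile (fun c => c ≠ ',') ('C' :: 'N' :: '=' :: v) =
      'C' :: 'N' :: '=' :: List.takeWhile (fun c => c ≠ ',') v from by
    simp [List.takeWhile]]
  rw [rstrip_cn]
  rw [show (3 : ℤ).toNat = 3 from rfl]
  rw [show List.drop 3 ('C' :: 'N' :: '=' :: PySem.Chars.rstrip (List.takeWhile (fun c => c ≠ ',') v)) =
      PySem.Chars.rstrip (List.takeWhile (fun c => c ≠ ',') v) from rfl]
  rw [show List.drop 3 ('C' :: 'N' :: '=' :: v) = v from rfl]
  exact strip_rstrip _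

lemma mySplit_eq_nil (s : List Char) (h : List.dropWhile (fun c => c ≠ ',') s = []) :
    mySplit s = [List.takeWhile (fun c => c ≠ ',') s] := by
  rw [mySplit]; simp only [h]; simp

lemma mySplit_eq_cons (s : List Char) (h : ¬ List.dropWhile (fun c => c ≠ ',') s = []) :
    mySplit s = List.takeWhile (fun c => c ≠ ',') s ::
      mySplit (List.dropWhile (fun c => c ≠ ',') s).tail := by
  rw [mySplit]; simp only [h]; simp [h]

lemma loop_eq_scan (s : List Char) : pyA_loop (mySplit s) = pyB_scan s := by
  induction s using mySplit.induct with
  | case1 s d h =>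
    rw [mySplit_eq_nil s h, pyB_scan, pyA_loop]
    simp only [cond_eq s]
    by_cases hc : PySem.Chars.startswith (PySem.Chars.lstrip s) ['C', 'N', '='] = true
    · simp only [hc, if_true]
      exact congrArg String.mk (val_eq s hc)
    · rw [Bool.not_eq_true] at hc
      simp only [hc, Bool.false_eq_true, if_false]
      rw [pyA_loop]
      simp
      intro hmem
      rw [List.dropWhile_eq_nil_iff] at h
      have := h ',' hmem
      simp at this
  | case2 s d h ih =>
    rw [mySplit_eq_cons s h, pyB_scan, pyA_loop]
    simp only [cond_eq s]
    by_cases hc : PySem.Chars.startswith (PySem.Chars.lstrip s) ['C', 'N', '='] = true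
    · simp only [hc, if_true]
      exact congrArg String.mk (val_eq s hc)
    · rw [Bool.not_eq_true] at hc
      simp only [hc, Bool.false_eq_true, if_false]
      rw [dif_neg h]
      exact ih

-- ===== VERDICT (by name: the statement is the Claim_ definition above) =====
theorem extract_domain_from_subject_py_spec : Claim_equal_extract_domain_from_subject_py := by
  intro subject _
  unfold Spec_extract_domain_from_subject_py
  unfold extract_domain_from_subject_py extract_domain_from_subject_py_alt
  by_cases h : subject.toList = []
  · simp [h]
  · simp only [h, if_neg, not_false_eq_true]
    rw [splitOn_eq_mySplit, loop_eq_scan]
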